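-- pv_equiv track=rewrite | github.com/Jackbar21/Leetcode | 2233-number-of-smooth-descent-periods-of-a-stock/number-of-smooth-descent-periods-of-a-stock.py | getDescentPeriods
-- ===== SOURCE A (Python) =====
-- from typing import List
--
-- def getDescentPeriods(prices: List[int]) -> int:
--     period = 0
--     prev_price = float("inf")
--     res = len(prices)
--     for price in prices:
--         if prev_price == price + 1:
--             period += 1
--         else:
--             res += period * (period + 1) // 2
--             period = 0
--
--         prev_price = price
--
--     return res + period * (period + 1) // 2
-- ===== SOURCE B (Python) =====
-- from typing import List
--
-- def getDescentPeriods(prices: List[int]) -> int: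
--     res = 0
--     cur = 0
--     prev = None
--     for price in prices:
--         cur = cur + 1 if prev == price + 1 else 1
--         res += cur
--         prev = price
--     return res
-- ===== Notes on version B (the rewrite author's own statement) =====
-- stated objective: simpler
-- what changed: B drops the triangular-number closed form period*(period+1)//2 (applied at run boundaries and at the end) and instead maintains cur, the length of the descent run ending at the current element, adding cur to the total at every element.
import Mathlib
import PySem

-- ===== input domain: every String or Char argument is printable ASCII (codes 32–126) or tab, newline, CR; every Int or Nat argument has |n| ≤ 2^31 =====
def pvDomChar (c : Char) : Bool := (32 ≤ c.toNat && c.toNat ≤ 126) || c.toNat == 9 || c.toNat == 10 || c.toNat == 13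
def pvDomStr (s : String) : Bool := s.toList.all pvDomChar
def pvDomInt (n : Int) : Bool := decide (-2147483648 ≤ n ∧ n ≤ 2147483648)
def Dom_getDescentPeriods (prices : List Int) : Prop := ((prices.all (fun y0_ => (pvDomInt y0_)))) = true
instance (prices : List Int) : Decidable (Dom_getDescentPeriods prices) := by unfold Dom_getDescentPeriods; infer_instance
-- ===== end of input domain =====

-- ===== PORT A =====
-- A: run-length state 'period' with triangular numbers added at run boundaries and at the end
def getDescentPeriodsGo (prices : List Int) (period : Int) (prev : Option Int) (res : Int) : Int :=
  match prices with
  | [] => res + PySem.Int.floordiv (period * (period + 1)) 2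
  | price :: rest =>
    if prev = some (price + 1) then
      getDescentPeriodsGo rest (period + 1) (some price) res
    else
      getDescentPeriodsGo rest 0 (some price) (res + PySem.Int.floordiv (period * (period + 1)) 2)

-- prev_price starts as float("inf"), equal to no integer: ported as Option Int with none
def getDescentPeriods (prices : List Int) : Int :=
  getDescentPeriodsGo prices 0 none (prices.length : Int)

-- ===== PORT B =====
-- B: incremental summation — cur is the length of the descent run ending here, added per element
def getDescentPeriodsAltGo (prices : List Int) (prev : Option Int) (cur res : Int) : Int :=
  match prices with
  | [] => res
  | price :: rest =>
    let cur' := if prev = some (price + 1) then cur + 1 else 1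
    getDescentPeriodsAltGo rest (some price) cur' (res + cur')

def getDescentPeriods_alt (prices : List Int) : Int :=
  getDescentPeriodsAltGo prices none 0 0

-- ===== PRECONDITION & SPEC =====
def Spec_getDescentPeriods (prices : List Int) (out : Int) : Prop := out = getDescentPeriods_alt prices
instance (prices : List Int) (out : Int) : Decidable (Spec_getDescentPeriods prices out) := by unfold Spec_getDescentPeriods; infer_instance

-- ===== CLAIM (what is proved, stated in full; the proofs are below) =====
def Claim_equal_getDescentPeriods : Prop := ∀ (prices : List Int), Dom_getDescentPeriods prices → Spec_getDescentPeriods prices (getDescentPeriods prices)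

-- ===== LEMMAS AND PROOFS =====
-- floordiv of the (always even) product p*(p+1) by 2 is exact
theorem pv_tri_even (p : Int) : 2 * PySem.Int.floordiv (p * (p + 1)) 2 = p * (p + 1) := by
  have h : (2 : Int) ∣ p * (p + 1) := (Int.even_mul_succ_self p).two_dvd
  rw [PySem.Int.floordiv_eq_ediv_of_pos (by norm_num : (0:Int) < 2)]
  omega

-- loop invariant: resA plus the pending triangle equals resB plus the remaining length
theorem pv_go_eq (rest : List Int) : ∀ (prev : Option Int) (period cur resA resB : Int),
    (prev = none ∨ cur = period + 1) →
    resA + PySem.Int.floordiv (period * (period + 1)) 2 = resB + (rest.length : Int) →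
    getDescentPeriodsGo rest period prev resA = getDescentPeriodsAltGo rest prev cur resB := by
  induction rest with
  | nil =>
    intro prev period cur resA resB _ hres
    simpa [getDescentPeriodsGo, getDescentPeriodsAltGo] using hres
  | cons price rest ih =>
    intro prev period cur resA resB hcur hres
    simp only [List.length_cons] at hres
    by_cases hp : prev = some (price + 1)
    · have hcur' : cur = period + 1 := by
        rcases hcur with h | h
        · simp [h] at hp
        · exact h
      simp only [getDescentPeriodsGo, getDescentPeriodsAltGo, hp]
      refine ih (some price) (period + 1) (cur + 1) resA (resB + (cur + 1)) (Or.inr (by omega)) ?_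
      have h1 := pv_tri_even period
      have h2 := pv_tri_even (period + 1)
      have : (period + 1) * (period + 1 + 1) = period * (period + 1) + 2 * (period + 1) := by ring
      push_cast at hres ⊢
      linarith
    · simp only [getDescentPeriodsGo, getDescentPeriodsAltGo, if_neg hp]
      refine ih (some price) 0 1 (resA + PySem.Int.floordiv (period * (period + 1)) 2)
        (resB + 1) (Or.inr (by omega)) ?_
      have h0 : PySem.Int.floordiv ((0:Int) * (0 + 1)) 2 = 0 := by decide
      rw [h0]
      push_cast at hres ⊢
      omega

-- ===== VERDICT (by name: the statement is the Claim_ definition above) =====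
theorem getDescentPeriods_spec : Claim_equal_getDescentPeriods := by
  intro prices _
  unfold Spec_getDescentPeriods getDescentPeriods getDescentPeriods_alt
  exact pv_go_eq prices none 0 0 (prices.length : Int) 0 (Or.inl rfl) (by simp [PySem.Int.floordiv])
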